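-- pv_equiv track=rewrite | github.com/MycoAI/taxotagger | src/taxotagger/utils.py | parse_unite_fasta_header
-- ===== SOURCE A (Python) =====
-- def parse_unite_fasta_header(header: str) -> list[str]:
--     """Parse metadata from a UNITE FASTA file header.
--
--     The header of a FASTA file must follow the formats:
--
--     - the UNITE format:
--         ```
--         >Accession|k__Kingdom;p__Phylum;c__Class;o__Order;f__Family;g__Genus;s__Species|SHIdentifier
--         ```
--     - only the accession:
--         ```
--         >Accession
--         ```
--
--     Note that the `SHIdentifier` (Species Hypothesis identifier) is optional.
--
--     Args:
--         header: A string representing the header of a FASTA file from the UNITE database.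
--
--     Returns:
--         A list of parsed metadata in the following order:
--             `[Accession, Kingdom, Phylum, Class, Order, Family, Genus, Species, SH_ID]`.
--             Empty strings are returned for missing metadata.
--
--     Examples:
--         Parse the header of a UNITE FASTA file
--         >>> header = ">MH855962|k__Fungi;p__Basidiomycota;c__Agaricomycetes;o__Corticiales;f__Corticiaceae;g__Waitea;s__Waitea_circinata|SH1011630.09FU"
--         >>> parse_unite_fasta_header(header)
--         ['MH855962', 'Fungi', 'Basidiomycota', 'Agaricomycetes', 'Corticiales', 'Corticiaceae', 'Waitea', 'Waitea_circinata', 'SH1011630.09FU']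
--
--         Parse the header of a FASTA file with only the accession
--         >>> process_unite_fasta_header(">MH855962")
--         ['MH855962', '', '', '', '', '', '', '', '']
--     """
--     result = [""] * 9
--
--     # Split the header into sections based on '|'
--     header = header.lstrip(">")
--     sections = header.split("|")
--
--     # The accession is the first part
--     result[0] = sections[0]
--
--     # If there is a taxonomy section, process it
--     if len(sections) > 1:
--         taxonomy_parts = sections[1].split(";")
--         taxonomy_map = {
--             "k__": 1,  # Kingdom
--             "p__": 2,  # Phylum
--             "c__": 3,  # Class
--             "o__": 4,  # Order
--             "f__": 5,  # Family
--             "g__": 6,  # Genus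
--             "s__": 7,  # Species
--         }
--         for part in taxonomy_parts:
--             prefix, value = part[:3], part[3:]
--             if prefix in taxonomy_map:
--                 result[taxonomy_map[prefix]] = value
--
--     # If there is an SH ID section, add it
--     if len(sections) > 2:
--         result[8] = sections[2]
--
--     return result
-- ===== SOURCE B (Python) =====
-- def parse_unite_fasta_header(header: str) -> list[str]:
--     sections = header.lstrip(">").split("|")
--     parts = sections[1].split(";")[::-1] if len(sections) > 1 else []
--
--     def rank(prefix):
--         for part in parts:
--             if part.startswith(prefix):
--                 return part[len(prefix):]
--         return ""
--
--     return [
--         sections[0],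
--         rank("k__"), rank("p__"), rank("c__"), rank("o__"),
--         rank("f__"), rank("g__"), rank("s__"),
--         sections[2] if len(sections) > 2 else "",
--     ]
-- ===== Notes on version B (the rewrite author's own statement) =====
-- stated objective: alternative
-- what changed: B drops A's prefix-to-index dict and mutable 9-slot scatter loop entirely: it reverses the taxonomy parts once and, for each of the seven ranks, does an independent linear search for the first part starting with that prefix (last occurrence wins by the reversal), assembling the result as one literal list.
import Mathlib
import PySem

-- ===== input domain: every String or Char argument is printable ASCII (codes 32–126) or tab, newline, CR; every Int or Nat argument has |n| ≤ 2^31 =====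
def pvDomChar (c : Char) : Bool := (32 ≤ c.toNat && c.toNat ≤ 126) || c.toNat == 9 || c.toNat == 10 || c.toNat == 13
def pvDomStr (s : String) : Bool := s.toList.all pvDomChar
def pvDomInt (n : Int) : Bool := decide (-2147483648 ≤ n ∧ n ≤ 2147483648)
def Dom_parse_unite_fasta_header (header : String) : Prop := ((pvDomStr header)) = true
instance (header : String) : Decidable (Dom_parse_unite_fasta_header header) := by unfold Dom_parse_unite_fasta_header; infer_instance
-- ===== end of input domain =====

-- B replaces A's prefix→index dict and mutable 9-slot scatter loop by an independent backward
-- linear search per rank over the reversed taxonomy parts (objective: alternative).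

-- ===== PORT A =====
-- Python's header.lstrip(">") removes exactly the leading '>' characters: exact as dropWhile (· == '>').
def pvLstripGt (s : List Char) : List Char := s.dropWhile (· == '>')

-- the literal taxonomy_map dict of A
def pvTaxonomyMap : PySem.Dict (List Char) Int :=
  ((((((PySem.Dict.empty.insert ['k','_','_'] 1).insert ['p','_','_'] 2).insert
      ['c','_','_'] 3).insert ['o','_','_'] 4).insert ['f','_','_'] 5).insert
      ['g','_','_'] 6).insert ['s','_','_'] 7

-- one iteration of A's 'for part in taxonomy_parts' loop (getD's default 0 is unreachable: guarded by the contains test, as in A)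
def pvStepA (r : List String) (part : List Char) : List String :=
  let pre := PySem.List.slice part none (some 3)
  let val := PySem.List.slice part (some 3) none
  if pvTaxonomyMap.contains pre then
    PySem.List.pySetD r (pvTaxonomyMap.getD pre 0) (String.ofList val)
  else r

def parse_unite_fasta_header (header : String) : List String :=
  let result : List String := ["", "", "", "", "", "", "", "", ""]
  let h := pvLstripGt header.toList
  let sections := PySem.Chars.splitOn h ['|']
  let result := PySem.List.pySetD result 0 (String.ofList (PySem.List.pyGetD sections 0 []))
  let result :=
    if sections.length > 1 then
      (PySem.Chars.splitOn (PySem.List.pyGetD sections 1 []) [';']).foldl pvStepA result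
    else result
  if sections.length > 2 then
    PySem.List.pySetD result 8 (String.ofList (PySem.List.pyGetD sections 2 []))
  else result

-- ===== PORT B =====
-- B's inner 'rank' function: first part (of the already-reversed list) starting with the prefix
def pvRank (parts : List (List Char)) (p : List Char) : String :=
  match parts with
  | [] => ""
  | part :: rest =>
    if PySem.Chars.startswith part p then
      String.ofList (PySem.List.slice part (some (p.length : Int)) none)
    else pvRank rest p

def parse_unite_fasta_header_alt (header : String) : List String :=
  let sections := PySem.Chars.splitOn (pvLstripGt header.toList) ['|']
  -- sections[1].split(";")[::-1] : [::-1] ported as List.reverse (exact: PySem.List.slice?_none_none_neg_one)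
  let parts :=
    if sections.length > 1 then
      (PySem.Chars.splitOn (PySem.List.pyGetD sections 1 []) [';']).reverse
    else []
  [String.ofList (PySem.List.pyGetD sections 0 []),
   pvRank parts ['k','_','_'], pvRank parts ['p','_','_'], pvRank parts ['c','_','_'],
   pvRank parts ['o','_','_'], pvRank parts ['f','_','_'], pvRank parts ['g','_','_'],
   pvRank parts ['s','_','_'],
   if sections.length > 2 then String.ofList (PySem.List.pyGetD sections 2 []) else ""]

-- ===== PRECONDITION & SPEC =====
def Spec_parse_unite_fasta_header (header : String) (out : List String) : Prop := out = parse_unite_fasta_header_alt header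
instance (header : String) (out : List String) : Decidable (Spec_parse_unite_fasta_header header out) := by unfold Spec_parse_unite_fasta_header; infer_instance

-- ===== CLAIM =====
def Claim_equal_parse_unite_fasta_header : Prop := ∀ (header : String), Dom_parse_unite_fasta_header header → Spec_parse_unite_fasta_header header (parse_unite_fasta_header header)

-- ===== LEMMAS AND PROOFS =====

-- the per-slot update one part of A's loop performs on the slot for prefix p
def pvUpd (p part : List Char) (a : String) : String :=
  if PySem.List.slice part none (some 3) = p then String.ofList (PySem.List.slice part (some 3) none) else a

-- the value of the slot for prefix p after A's whole loop, starting from a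
def pvSlot (p : List Char) (parts : List (List Char)) (a : String) : String :=
  match parts with
  | [] => a
  | part :: rest => pvSlot p rest (pvUpd p part a)

-- Option version of B's search
def pvFind? (parts : List (List Char)) (p : List Char) : Option String :=
  match parts with
  | [] => none
  | part :: rest =>
    if PySem.Chars.startswith part p then
      some (String.ofList (PySem.List.slice part (some (p.length : Int)) none))
    else pvFind? rest p

theorem pvRank_eq_find (parts : List (List Char)) (p : List Char) :
    pvRank parts p = (pvFind? parts p).getD "" := by
  induction parts with
  | nil => rfl
  | cons part rest ih => by_cases h : PySem.Chars.startswith part p <;> simp [pvRank, pvFind?, h, ih]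

theorem pvFind?_append_singleton (l : List (List Char)) (x p : List Char) :
    pvFind? (l ++ [x]) p =
      (pvFind? l p).or (if PySem.Chars.startswith x p then
        some (String.ofList (PySem.List.slice x (some (p.length : Int)) none)) else none) := by
  induction l with
  | nil => simp [pvFind?]
  | cons part rest ih => by_cases h : PySem.Chars.startswith part p <;> simp [pvFind?, h, ih]

-- the match conditions of A and B agree for a length-3 prefix
theorem pvCond_eq (part p : List Char) (hp : p.length = 3) :
    (PySem.List.slice part none (some 3) = p) ↔ (PySem.Chars.startswith part p = true) := by
  have h3 : PySem.List.slice part none (some 3) = part.take 3 := by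
    rw [show (3 : Int) = ((3 : Nat) : Int) by norm_num, PySem.List.slice_to_natCast]
  rw [PySem.Chars.startswith_iff, List.prefix_iff_eq_take, hp, h3, eq_comm]

theorem pvUpd_eq (p part : List Char) (a : String) (hp : p.length = 3) :
    pvUpd p part a =
      ((if PySem.Chars.startswith part p then
        some (String.ofList (PySem.List.slice part (some (p.length : Int)) none)) else none).getD a) := by
  unfold pvUpd
  by_cases h : PySem.Chars.startswith part p = true
  · rw [if_pos ((pvCond_eq part p hp).mpr h)]
    simp [h, hp]
  · rw [if_neg (fun hc => h ((pvCond_eq part p hp).mp hc))]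
    simp [h]

-- A's slot value = B's backward search, with default a
theorem pvSlot_eq_find (p : List Char) (hp : p.length = 3) (parts : List (List Char)) (a : String) :
    pvSlot p parts a = ((pvFind? parts.reverse p).or (some a)).getD "" := by
  induction parts generalizing a with
  | nil => simp [pvSlot, pvFind?]
  | cons part rest ih =>
    rw [pvSlot, ih, List.reverse_cons, pvFind?_append_singleton, pvUpd_eq p part a hp]
    cases h : pvFind? rest.reverse p <;>
      cases hs : (if PySem.Chars.startswith part p then
        some (String.ofList (PySem.List.slice part (some (p.length : Int)) none)) else none) <;>
      simp [Option.or]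

theorem pvSlot_eq_rank (p : List Char) (hp : p.length = 3) (parts : List (List Char)) :
    pvSlot p parts "" = pvRank parts.reverse p := by
  rw [pvRank_eq_find, pvSlot_eq_find p hp]
  cases h : pvFind? parts.reverse p <;> simp [Option.or]

-- one iteration of A's loop on an explicit 9-list updates each rank slot by pvUpd
theorem pvStepA_eq (part : List Char) (a0 a1 a2 a3 a4 a5 a6 a7 a8 : String) :
    pvStepA [a0, a1, a2, a3, a4, a5, a6, a7, a8] part
      = [a0, pvUpd ['k','_','_'] part a1, pvUpd ['p','_','_'] part a2, pvUpd ['c','_','_'] part a3,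
         pvUpd ['o','_','_'] part a4, pvUpd ['f','_','_'] part a5, pvUpd ['g','_','_'] part a6,
         pvUpd ['s','_','_'] part a7, a8] := by
  unfold pvStepA pvUpd
  simp only []
  generalize PySem.List.slice part none (some 3) = pre
  generalize PySem.List.slice part (some 3) none = val
  by_cases hk : pre = ['k','_','_']
  · subst hk
    simp [show pvTaxonomyMap.contains ['k','_','_'] = true from by decide,
      show pvTaxonomyMap.getD ['k','_','_'] 0 = 1 from by decide,
      PySem.List.pySetD, PySem.List.pySet?, PySem.List.pyIdx?]
  · by_cases hp : pre = ['p','_','_']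
    · subst hp
      simp [show pvTaxonomyMap.contains ['p','_','_'] = true from by decide,
        show pvTaxonomyMap.getD ['p','_','_'] 0 = 2 from by decide,
        PySem.List.pySetD, PySem.List.pySet?, PySem.List.pyIdx?]
    · by_cases hc : pre = ['c','_','_']
      · subst hc
        simp [show pvTaxonomyMap.contains ['c','_','_'] = true from by decide,
          show pvTaxonomyMap.getD ['c','_','_'] 0 = 3 from by decide,
          PySem.List.pySetD, PySem.List.pySet?, PySem.List.pyIdx?]
      · by_cases ho : pre = ['o','_','_']
        · subst ho
          simp [show pvTaxonomyMap.contains ['o','_','_'] = true from by decide,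
            show pvTaxonomyMap.getD ['o','_','_'] 0 = 4 from by decide,
            PySem.List.pySetD, PySem.List.pySet?, PySem.List.pyIdx?]
        · by_cases hf : pre = ['f','_','_']
          · subst hf
            simp [show pvTaxonomyMap.contains ['f','_','_'] = true from by decide,
              show pvTaxonomyMap.getD ['f','_','_'] 0 = 5 from by decide,
              PySem.List.pySetD, PySem.List.pySet?, PySem.List.pyIdx?]
          · by_cases hg : pre = ['g','_','_']
            · subst hg
              simp [show pvTaxonomyMap.contains ['g','_','_'] = true from by decide,
                show pvTaxonomyMap.getD ['g','_','_'] 0 = 6 from by decide,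
                PySem.List.pySetD, PySem.List.pySet?, PySem.List.pyIdx?]
            · by_cases hs : pre = ['s','_','_']
              · subst hs
                simp [show pvTaxonomyMap.contains ['s','_','_'] = true from by decide,
                  show pvTaxonomyMap.getD ['s','_','_'] 0 = 7 from by decide,
                  PySem.List.pySetD, PySem.List.pySet?, PySem.List.pyIdx?]
              · have hcont : pvTaxonomyMap.contains pre = false := by
                  simp [pvTaxonomyMap, PySem.Dict.contains_insert, PySem.Dict.contains_empty,
                    hk, hp, hc, ho, hf, hg, hs]
                simp [hcont, hk, hp, hc, ho, hf, hg, hs]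

-- A's whole fold equals the slot characterisation
theorem pvFoldA (parts : List (List Char)) (a0 a1 a2 a3 a4 a5 a6 a7 a8 : String) :
    parts.foldl pvStepA [a0, a1, a2, a3, a4, a5, a6, a7, a8]
      = [a0, pvSlot ['k','_','_'] parts a1, pvSlot ['p','_','_'] parts a2, pvSlot ['c','_','_'] parts a3,
         pvSlot ['o','_','_'] parts a4, pvSlot ['f','_','_'] parts a5, pvSlot ['g','_','_'] parts a6,
         pvSlot ['s','_','_'] parts a7, a8] := by
  induction parts generalizing a1 a2 a3 a4 a5 a6 a7 with
  | nil => rfl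
  | cons part rest ih => simp only [List.foldl_cons, pvStepA_eq, ih, pvSlot]

theorem pvSet0 (s0 : String) :
    PySem.List.pySetD ["", "", "", "", "", "", "", "", ""] 0 s0
      = [s0, "", "", "", "", "", "", "", ""] := by
  simp [PySem.List.pySetD, PySem.List.pySet?, PySem.List.pyIdx?]

theorem pvSet8 (a0 a1 a2 a3 a4 a5 a6 a7 a8 sh : String) :
    PySem.List.pySetD [a0, a1, a2, a3, a4, a5, a6, a7, a8] 8 sh
      = [a0, a1, a2, a3, a4, a5, a6, a7, sh] := by
  simp [PySem.List.pySetD, PySem.List.pySet?, PySem.List.pyIdx?]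

-- ===== VERDICT =====
theorem parse_unite_fasta_header_spec : Claim_equal_parse_unite_fasta_header := by
  unfold Claim_equal_parse_unite_fasta_header
  intro header _
  unfold Spec_parse_unite_fasta_header parse_unite_fasta_header parse_unite_fasta_header_alt
  simp only []
  generalize PySem.Chars.splitOn (pvLstripGt header.toList) ['|'] = sections
  generalize hP : PySem.Chars.splitOn (PySem.List.pyGetD sections 1 []) [';'] = parts
  by_cases h1 : sections.length > 1
  · by_cases h2 : sections.length > 2 <;>
      simp [h1, h2, pvSet0, pvFoldA, pvSet8] <;>
      exact ⟨pvSlot_eq_rank _ rfl parts, pvSlot_eq_rank _ rfl parts, pvSlot_eq_rank _ rfl parts,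
        pvSlot_eq_rank _ rfl parts, pvSlot_eq_rank _ rfl parts, pvSlot_eq_rank _ rfl parts,
        pvSlot_eq_rank _ rfl parts⟩
  · have h2 : ¬ sections.length > 2 := by omega
    simp [h1, h2, pvSet0, pvRank]
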